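-- pv_equiv track=rewrite | github.com/mariadaan/AdventOfCode2021 | Day_10/day10.py | reverse_strings
-- ===== SOURCE A (Python) =====
-- def reverse_strings(chunks):
-- 	reversed = []
-- 	for row in chunks:
-- 		row = row[::-1]
-- 		row = row.replace('{', '}')
-- 		row = row.replace('(', ')')
-- 		row = row.replace('<', '>')
-- 		row = row.replace('[', ']')
-- 		reversed.append(row)
-- 	return reversed
-- ===== SOURCE B (Python) =====
-- _M = {'{': '}', '(': ')', '<': '>', '[': ']'}
--
-- def reverse_strings(chunks):
--     return [''.join(_M.get(c, c) for c in reversed(row)) for row in chunks]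
-- ===== Notes on version B (the rewrite author's own statement) =====
-- stated objective: simpler
-- what changed: One character-level pass per row (reversed iteration with a fixed bracket-map lookup defaulting to the character) replaces A's whole-string slice reversal followed by four separate .replace scans, with a comprehension instead of an accumulator loop.
import Mathlib
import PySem

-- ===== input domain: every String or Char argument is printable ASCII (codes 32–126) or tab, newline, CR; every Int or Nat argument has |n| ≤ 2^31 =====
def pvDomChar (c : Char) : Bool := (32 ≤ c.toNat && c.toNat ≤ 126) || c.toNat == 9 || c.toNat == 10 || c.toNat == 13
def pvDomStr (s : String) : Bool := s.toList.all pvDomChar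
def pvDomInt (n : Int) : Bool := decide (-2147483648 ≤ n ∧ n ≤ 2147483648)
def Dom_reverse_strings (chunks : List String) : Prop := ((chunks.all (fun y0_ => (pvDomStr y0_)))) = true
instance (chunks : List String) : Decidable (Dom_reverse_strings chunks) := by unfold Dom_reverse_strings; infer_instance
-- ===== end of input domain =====

-- B does each row's reversal and bracket swap in a single reversed character pass
-- (map lookup with the character itself as default) instead of A's slice reversal
-- plus four .replace scans; simpler, same asymptotic cost.

-- ===== PORT A =====
def reverse_strings (chunks : List String) : List String :=
  chunks.foldl (fun acc row =>
    -- row[::-1]: step -1 is nonzero, so slice? always returns some; getD's default is dead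
    let row := (PySem.Str.slice? row none none (-1)).getD row
    let row := PySem.Str.replace row "{" "}"
    let row := PySem.Str.replace row "(" ")"
    let row := PySem.Str.replace row "<" ">"
    let row := PySem.Str.replace row "[" "]"
    acc ++ [row]) []

-- ===== PORT B =====
-- the module-level dict _M of Source B
def pvM : PySem.Dict Char Char :=
  PySem.Dict.ofList [('{', '}'), ('(', ')'), ('<', '>'), ('[', ']')]

def reverse_strings_alt (chunks : List String) : List String :=
  chunks.map (fun row =>
    String.ofList (row.toList.reverse.map (fun c => PySem.Dict.getD pvM c c)))

-- ===== PRECONDITION & SPEC =====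
def Spec_reverse_strings (chunks : List String) (out : List String) : Prop := out = reverse_strings_alt chunks
instance (chunks : List String) (out : List String) : Decidable (Spec_reverse_strings chunks out) := by unfold Spec_reverse_strings; infer_instance

-- ===== CLAIM (what is proved, stated in full; the proofs are below) =====
def Claim_equal_reverse_strings : Prop := ∀ (chunks : List String), Dom_reverse_strings chunks → Spec_reverse_strings chunks (reverse_strings chunks)

-- ===== LEMMAS AND PROOFS =====

-- single-character replace is a character map
theorem go_single (o n : Char) : ∀ (fuel : Nat) (l acc : List Char), l.length ≤ fuel →
    PySem.Chars.replace.go [o] [n] fuel l acc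
      = acc.reverse ++ l.map (fun c => if c = o then n else c) := by
  intro fuel
  induction fuel with
  | zero =>
    intro l acc h
    have : l = [] := List.eq_nil_of_length_eq_zero (Nat.le_zero.mp h)
    subst this
    simp [PySem.Chars.replace.go]
  | succ f ih =>
    intro l acc h
    cases l with
    | nil => simp [PySem.Chars.replace.go]
    | cons c t =>
      simp only [PySem.Chars.replace.go]
      by_cases hco : o = c
      · subst hco
        have hp : List.isPrefixOf [o] (o :: t) = true := by simp [List.isPrefixOf]
        rw [if_pos hp]
        have h1 : List.drop (List.length [o]) (o :: t) = t := rfl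
        have h2 : List.reverse [n] ++ acc = n :: acc := rfl
        rw [h1, h2, ih t _ (by simpa using Nat.le_of_succ_le_succ h)]
        simp
      · have hp : List.isPrefixOf [o] (c :: t) = false := by
          simp [List.isPrefixOf]; exact hco
        rw [if_neg (by simp [hp])]
        rw [ih t _ (by simpa using Nat.le_of_succ_le_succ h)]
        simp [Ne.symm hco]

theorem replace_single (s : List Char) (o n : Char) :
    PySem.Chars.replace s [o] [n] = s.map (fun c => if c = o then n else c) := by
  rw [PySem.Chars.replace]
  rw [if_neg (by simp)]
  simpa using go_single o n s.length s [] (le_refl _)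

-- B's per-character lookup, as an explicit conditional
theorem getD_pvM (c : Char) :
    PySem.Dict.getD pvM c c
      = if c = '{' then '}' else if c = '(' then ')' else
        if c = '<' then '>' else if c = '[' then ']' else c := by
  have hm : pvM = PySem.Dict.mk [('{', '}'), ('(', ')'), ('<', '>'), ('[', ']')] := by decide
  rw [hm]
  rw [PySem.Dict.getD]
  rw [PySem.Dict.get?_mk_cons, PySem.Dict.get?_mk_cons, PySem.Dict.get?_mk_cons,
      PySem.Dict.get?_mk_cons]
  simp only [beq_iff_eq]
  split_ifs with h1 h2 h3 h4 <;> simp_all [eq_comm, PySem.Dict.get?]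

-- the four successive single-character maps compose to B's lookup
theorem four_maps (l : List Char) :
    ((((l.map (fun c => if c = '{' then '}' else c)).map
        (fun c => if c = '(' then ')' else c)).map
        (fun c => if c = '<' then '>' else c)).map
        (fun c => if c = '[' then ']' else c))
      = l.map (fun c => PySem.Dict.getD pvM c c) := by
  simp only [List.map_map]
  apply List.map_congr_left
  intro c _
  rw [getD_pvM]
  by_cases h1 : c = '{' <;> by_cases h2 : c = '(' <;> by_cases h3 : c = '<' <;>
    by_cases h4 : c = '[' <;> simp_all

theorem row_eq (row : String) :
    PySem.Str.replace (PySem.Str.replace (PySem.Str.replace (PySem.Str.replace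
      ((PySem.Str.slice? row none none (-1)).getD row) "{" "}") "(" ")") "<" ">") "[" "]"
      = String.ofList (row.toList.reverse.map (fun c => PySem.Dict.getD pvM c c)) := by
  rw [PySem.Str.slice?_none_none_neg_one]
  apply String.toList_inj.mp
  simp only [PySem.Str.toList_replace, String.toList_ofList, Option.getD_some]
  rw [show ("{" : String).toList = ['{'] from rfl, show ("}" : String).toList = ['}'] from rfl,
      show ("(" : String).toList = ['('] from rfl, show (")" : String).toList = [')'] from rfl,
      show ("<" : String).toList = ['<'] from rfl, show (">" : String).toList = ['>'] from rfl,
      show ("[" : String).toList = ['['] from rfl, show ("]" : String).toList = [']'] from rfl]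
  rw [replace_single, replace_single, replace_single, replace_single, four_maps]

theorem foldl_push {α β : Type} (f : α → β) (l : List α) (a : List β) :
    l.foldl (fun acc x => acc ++ [f x]) a = a ++ l.map f := by
  induction l generalizing a with
  | nil => simp
  | cons x t ih => simp [ih]

-- ===== VERDICT (by name: the statement is the Claim_ definition above) =====
theorem reverse_strings_spec : Claim_equal_reverse_strings := by
  intro chunks _
  show reverse_strings chunks = reverse_strings_alt chunks
  unfold reverse_strings reverse_strings_alt
  rw [foldl_push]
  simp only [List.nil_append]
  apply List.map_congr_left
  intro row _
  exact row_eq row
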